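-- pv_equiv track=rewrite | github.com/sam-dumont/immich-video-memory-generator | src/immich_memories/analysis/pipeline.py | _union_find
-- ===== SOURCE A (Python) =====
-- def _union_find(
--
--     asset_ids: list[str],
--     pairs: list[tuple[str, str, int]],
-- ) -> list[set[str]]:
--     """Group assets using union-find algorithm.
--
--     Args:
--         asset_ids: All asset IDs.
--         pairs: List of (id1, id2, distance) tuples for similar pairs.
--
--     Returns:
--         List of sets, each containing asset IDs in a cluster.
--     """
--     # Initialize parent mapping
--     parent = {aid: aid for aid in asset_ids}
--
--     def find(x: str) -> str:
--         if parent[x] != x: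
--             parent[x] = find(parent[x])  # Path compression
--         return parent[x]
--
--     def union(x: str, y: str) -> None:
--         px, py = find(x), find(y)
--         if px != py:
--             parent[px] = py
--
--     # Union similar pairs
--     for id1, id2, _ in pairs:
--         union(id1, id2)
--
--     # Group by root
--     groups: dict[str, set[str]] = {}
--     for aid in asset_ids:
--         root = find(aid)
--         if root not in groups:
--             groups[root] = set()
--         groups[root].add(aid)
--
--     return list(groups.values())
-- ===== SOURCE B (Python) =====
-- def _union_find(
--     asset_ids: list[str],
--     pairs: list[tuple[str, str, int]],
-- ) -> list[set[str]]:
--     """Group assets into connected components by label propagation.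
--
--     Each asset starts labelled with itself; every similar pair merges the two
--     labels by rewriting one class label to the other across the whole mapping.
--     """
--     label = {aid: aid for aid in asset_ids}
--     for id1, id2, _ in pairs:
--         l1, l2 = label[id1], label[id2]
--         if l1 != l2:
--             label = {k: (l2 if v == l1 else v) for k, v in label.items()}
--     groups: dict[str, set[str]] = {}
--     for aid in asset_ids:
--         groups.setdefault(label[aid], set()).add(aid)
--     return list(groups.values())
-- ===== Notes on version B (the rewrite author's own statement) =====
-- stated objective: simpler
-- what changed: Replaces the union-find forest (parent pointers, recursive find with path compression, union by root) with flat label propagation: a single aid->label map where each similar pair merges two classes by rewriting one class label to the other, then groups by label.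
import Mathlib
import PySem

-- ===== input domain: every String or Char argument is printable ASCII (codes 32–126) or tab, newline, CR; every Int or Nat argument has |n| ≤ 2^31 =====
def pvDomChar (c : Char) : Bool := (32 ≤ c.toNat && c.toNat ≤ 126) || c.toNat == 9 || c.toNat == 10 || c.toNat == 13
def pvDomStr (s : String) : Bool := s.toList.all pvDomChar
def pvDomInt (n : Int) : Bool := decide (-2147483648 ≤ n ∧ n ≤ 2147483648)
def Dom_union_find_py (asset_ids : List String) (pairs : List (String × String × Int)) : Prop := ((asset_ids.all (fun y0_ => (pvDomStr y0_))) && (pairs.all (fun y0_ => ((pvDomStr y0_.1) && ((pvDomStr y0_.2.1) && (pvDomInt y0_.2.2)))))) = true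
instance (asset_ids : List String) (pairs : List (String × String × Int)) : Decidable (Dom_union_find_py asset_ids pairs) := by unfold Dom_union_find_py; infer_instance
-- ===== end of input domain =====

-- B replaces the union-find forest (recursive find with path compression) by flat
-- label propagation over a single aid->label dict; objective: simpler. Python A mutates
-- nothing observable to the caller; equivalence is about the return value.

-- ===== PORT A =====
-- find(x) with path compression; Python's recursion terminates because parent is a
-- forest — the Nat fuel is only a totality guard (never exhausted under that invariant).
-- A missing key (Python: KeyError) is excluded by Pre_; the `none` branch is unreachable there.
def findA : Nat → PySem.Dict String String → String → String × PySem.Dict String String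
  | 0, p, x => (x, p)
  | n+1, p, x =>
    match p.get? x with
    | none => (x, p)
    | some px =>
      if px ≠ x then
        let res := findA n p px
        (res.1, res.2.insert x res.1)
      else (x, p)

def unionA (p : PySem.Dict String String) (x y : String) : PySem.Dict String String :=
  let r1 := findA p.size p x
  let r2 := findA r1.2.size r1.2 y
  if r1.1 ≠ r2.1 then r2.2.insert r1.1 r2.1 else r2.2

def union_find_py (asset_ids : List String) (pairs : List (String × String × Int)) : List (List String) :=
  let parent0 := asset_ids.foldl (fun d a => d.insert a a) PySem.Dict.empty
  let parent1 := pairs.foldl (fun p pr => unionA p pr.1 pr.2.1) parent0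
  let st := asset_ids.foldl
    (fun (st : PySem.Dict String String × PySem.Dict String (PySem.Set String)) aid =>
      let fr := findA st.1.size st.1 aid
      let g1 := if st.2.contains fr.1 then st.2 else st.2.insert fr.1 PySem.Set.empty
      (fr.2, g1.insert fr.1 (PySem.Set.add (g1.getD fr.1 PySem.Set.empty) aid)))
    (parent1, PySem.Dict.empty)
  st.2.values

-- ===== PORT B =====
-- {k: (l2 if v == l1 else v) for k, v in label.items()}
def relabelB (lab : PySem.Dict String String) (l1 l2 : String) : PySem.Dict String String :=
  PySem.Dict.mk (lab.items.map (fun kv => (kv.1, if kv.2 = l1 then l2 else kv.2)))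

-- label[id1] / label[id2] raise KeyError on ids outside the map (excluded by Pre_);
-- the total form getD k k is unreachable in its default there.
def stepB (lab : PySem.Dict String String) (pr : String × String × Int) : PySem.Dict String String :=
  let l1 := lab.getD pr.1 pr.1
  let l2 := lab.getD pr.2.1 pr.2.1
  if l1 ≠ l2 then relabelB lab l1 l2 else lab

def union_find_py_alt (asset_ids : List String) (pairs : List (String × String × Int)) : List (List String) :=
  let label0 := asset_ids.foldl (fun d a => d.insert a a) PySem.Dict.empty
  let label1 := pairs.foldl stepB label0
  let groups := asset_ids.foldl
    (fun (g : PySem.Dict String (PySem.Set String)) aid =>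
      let r := label1.getD aid aid
      let g1 := g.setdefault r PySem.Set.empty
      g1.insert r (PySem.Set.add (g1.getD r PySem.Set.empty) aid))
    PySem.Dict.empty
  groups.values

-- ===== PRECONDITION & SPEC =====
-- Pre_ excludes exactly the inputs where a pair mentions an id not in asset_ids:
-- there both Pythons raise KeyError (A in find, B at label[id]).
def Pre_union_find_py (asset_ids : List String) (pairs : List (String × String × Int)) : Prop :=
  ∀ pr ∈ pairs, pr.1 ∈ asset_ids ∧ pr.2.1 ∈ asset_ids
instance (asset_ids : List String) (pairs : List (String × String × Int)) : Decidable (Pre_union_find_py asset_ids pairs) := by unfold Pre_union_find_py; infer_instance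

def pvWitness_union_find_py : List String × (List (String × String × Int)) :=
  (["a", "b", "c"], [("a", "b", 1)])

def Spec_union_find_py (asset_ids : List String) (pairs : List (String × String × Int)) (out : List (List String)) : Prop := out = union_find_py_alt asset_ids pairs
instance (asset_ids : List String) (pairs : List (String × String × Int)) (out : List (List String)) : Decidable (Spec_union_find_py asset_ids pairs out) := by unfold Spec_union_find_py; infer_instance

-- ===== CLAIM (what is proved, stated in full; the proofs are below) =====
def Claim_equal_union_find_py : Prop := ∀ (asset_ids : List String) (pairs : List (String × String × Int)), Dom_union_find_py asset_ids pairs → Pre_union_find_py asset_ids pairs → Spec_union_find_py asset_ids pairs (union_find_py asset_ids pairs)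

-- ===== LEMMAS AND PROOFS =====

-- z is rooted at r in the parent forest p (r a self-parent reached from z).
inductive RootedAt (p : PySem.Dict String String) : String → String → Prop where
  | self : ∀ x, p.get? x = some x → RootedAt p x x
  | step : ∀ x y r, p.get? x = some y → y ≠ x → RootedAt p y r → RootedAt p x r

def SameRoot (p : PySem.Dict String String) (a b : String) : Prop :=
  ∃ r, RootedAt p a r ∧ RootedAt p b r

-- forest invariant: keys are exactly S (in order) and parents strictly increase h
def GoodA (S : List String) (h : String → Nat) (p : PySem.Dict String String) : Prop :=
  p.keys = S ∧ ∀ x y, p.get? x = some y → y ∈ S ∧ (y ≠ x → h x < h y)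

-- the equivalence obtained from E by merging the classes of x and y
def joinRel (E : String → String → Prop) (x y a b : String) : Prop :=
  E a b ∨ (E a x ∧ E y b) ∨ (E a y ∧ E x b)

def msr (h : String → Nat) (S : List String) (x : String) : Nat :=
  (S.toFinset.filter (fun y => h x ≤ h y)).card

def LabF (lab : PySem.Dict String String) (z : String) : String := lab.getD z z

theorem rooted_unique {p : PySem.Dict String String} {x r r' : String}
    (h1 : RootedAt p x r) (h2 : RootedAt p x r') : r = r' := by
  induction h1 generalizing r' with
  | self x hx =>
    cases h2 with
    | self => rfl
    | step _ y _ hy hne _ => rw [hx] at hy; cases hy; exact absurd rfl hne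
  | step x y r hx hne _ ih =>
    cases h2 with
    | self _ hx' => rw [hx] at hx'; cases hx'; exact absurd rfl hne
    | step _ y' _ hy' _ hr' => rw [hx] at hy'; cases hy'; exact ih hr'

theorem rooted_root {p : PySem.Dict String String} {x r : String}
    (h : RootedAt p x r) : p.get? r = some r := by
  induction h with
  | self _ hx => exact hx
  | step _ _ _ _ _ _ ih => exact ih

theorem rooted_refl_root {p : PySem.Dict String String} {x r : String}
    (h : RootedAt p x r) : RootedAt p r r := RootedAt.self r (rooted_root h)

theorem good_h_le {S : List String} {h : String → Nat} {p : PySem.Dict String String}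
    (G : GoodA S h p) {x r : String} (hr : RootedAt p x r) : x = r ∨ h x < h r := by
  induction hr with
  | self _ _ => exact Or.inl rfl
  | step x y r hx hne hyr ih =>
    right
    have hxy := ((G.2 x y hx).2 hne)
    rcases ih with rfl | hlt
    · exact hxy
    · exact lt_trans hxy hlt

theorem msr_pos {h : String → Nat} {S : List String} {x : String} (hx : x ∈ S) :
    0 < msr h S x := by
  apply Finset.card_pos.mpr
  exact ⟨x, Finset.mem_filter.mpr ⟨List.mem_toFinset.mpr hx, by simp⟩⟩

theorem msr_lt {h : String → Nat} {S : List String} {x y : String} (hx : x ∈ S)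
    (hlt : h x < h y) : msr h S y < msr h S x := by
  apply Finset.card_lt_card
  constructor
  · intro z hz
    rcases Finset.mem_filter.mp hz with ⟨hzS, hzh⟩
    refine Finset.mem_filter.mpr ⟨hzS, ?_⟩
    have hzh' : h y ≤ h z := hzh
    show h x ≤ h z
    omega
  · intro hsub
    have hxmem : x ∈ S.toFinset.filter (fun y => h x ≤ h y) :=
      Finset.mem_filter.mpr ⟨List.mem_toFinset.mpr hx, by simp⟩
    have h2 : h y ≤ h x := (Finset.mem_filter.mp (hsub hxmem)).2
    omega

theorem msr_le {h : String → Nat} {S : List String} (x : String) :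
    msr h S x ≤ S.length :=
  le_trans (Finset.card_le_card (Finset.filter_subset _ _)) S.toFinset_card_le

theorem good_get?_total {S : List String} {h : String → Nat} {p : PySem.Dict String String}
    (G : GoodA S h p) {x : String} (hx : x ∈ S) : ∃ y, p.get? x = some y := by
  have : x ∈ p.keys := G.1 ▸ hx
  cases hget : p.get? x with
  | none => exact absurd this ((PySem.Dict.get?_eq_none_iff_not_mem_keys p x).mp hget)
  | some y => exact ⟨y, rfl⟩

theorem good_size {S : List String} {h : String → Nat} {p : PySem.Dict String String}
    (G : GoodA S h p) : p.size = S.length := by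
  have hk : p.keys.length = S.length := by rw [G.1]
  simp only [PySem.Dict.keys, List.length_map] at hk
  exact hk

-- inserting x ↦ (root of x) does not change any root
theorem rooted_insert_root_iff {p : PySem.Dict String String} {x r : String}
    (hroot : RootedAt p x r) (z w : String) :
    RootedAt (p.insert x r) z w ↔ RootedAt p z w := by
  have hr : p.get? r = some r := rooted_root hroot
  have hq : ∀ u, (p.insert x r).get? u = if u = x then some r else p.get? u := fun u =>
    PySem.Dict.get?_insert p x u r
  constructor
  · intro hzw
    induction hzw with
    | self z hz =>
      rw [hq z] at hz
      by_cases hzx : z = x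
      · subst hzx
        rw [if_pos rfl] at hz
        cases hz
        exact hroot
      · rw [if_neg hzx] at hz
        exact RootedAt.self z hz
    | step z y w hz hne hyw ih =>
      rw [hq z] at hz
      by_cases hzx : z = x
      · subst hzx
        rw [if_pos rfl] at hz
        cases hz
        have hw : w = r := rooted_unique ih (rooted_refl_root hroot)
        subst hw
        exact hroot
      · rw [if_neg hzx] at hz
        exact RootedAt.step z y w hz hne ih
  · intro hzw
    induction hzw with
    | self z hz =>
      by_cases hzx : z = x
      · have hrx : r = x := rooted_unique hroot (hzx ▸ RootedAt.self z hz)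
        refine RootedAt.self z ?_
        rw [hq z, if_pos hzx, hrx, ← hzx]
      · exact RootedAt.self z (by rw [hq z, if_neg hzx]; exact hz)
    | step z y w hz hne hyw ih =>
      by_cases hzx : z = x
      · have hw : w = r :=
          rooted_unique (hzx ▸ RootedAt.step z y w hz hne hyw) hroot
        rw [hzx, hw]
        by_cases hrx : r = x
        · rw [hrx]
          exact RootedAt.self x (by rw [hrx] at hq; rw [hq x, if_pos rfl])
        · exact RootedAt.step x r r (by rw [hq x, if_pos rfl]) hrx
            (RootedAt.self r (by rw [hq r, if_neg hrx]; exact hr))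
      · exact RootedAt.step z y w (by rw [hq z, if_neg hzx]; exact hz) hne ih

theorem rooted_mem {S : List String} {h : String → Nat} {p : PySem.Dict String String}
    (G : GoodA S h p) : ∀ {x r : String}, RootedAt p x r → x ∈ S → r ∈ S := by
  intro x r hr
  induction hr with
  | self x hx => exact fun hmem => hmem
  | step x y r hxy hne hyr ih => exact fun _ => ih ((G.2 x y hxy).1)

-- the find lemma: find returns the root and only compresses paths
theorem find_ok {S : List String} {h : String → Nat} :
    ∀ (fuel : Nat) (p : PySem.Dict String String) (x : String),
      GoodA S h p → x ∈ S → msr h S x ≤ fuel →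
      RootedAt p x (findA fuel p x).1 ∧ GoodA S h (findA fuel p x).2 ∧
        (∀ z w, RootedAt (findA fuel p x).2 z w ↔ RootedAt p z w) := by
  intro fuel
  induction fuel with
  | zero =>
    intro p x G hx hmsr
    exact absurd hmsr (by have := msr_pos (h := h) hx; omega)
  | succ fuel ih =>
    intro p x G hx hmsr
    obtain ⟨px, hpx⟩ := good_get?_total G hx
    by_cases hpxx : px ≠ x
    · have hpxS : px ∈ S := (G.2 x px hpx).1
      have hlt : h x < h px := (G.2 x px hpx).2 hpxx
      have hm2 : msr h S px ≤ fuel := by have := msr_lt hx hlt; omega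
      obtain ⟨hr1, hG1, hpres⟩ := ih p px G hpxS hm2
      have hred : findA (fuel+1) p x =
          ((findA fuel p px).1, (findA fuel p px).2.insert x (findA fuel p px).1) := by
        simp [findA, hpx, hpxx]
      rw [hred]
      have hrx : RootedAt p x (findA fuel p px).1 := RootedAt.step _ _ _ hpx hpxx hr1
      have hrS : (findA fuel p px).1 ∈ S := rooted_mem G hrx hx
      have hrxq : RootedAt (findA fuel p px).2 x (findA fuel p px).1 := (hpres _ _).mpr hrx
      obtain ⟨hk1, he1⟩ := hG1
      refine ⟨hrx, ⟨?_, ?_⟩, ?_⟩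
      · have hc : (findA fuel p px).2.contains x = true :=
          (PySem.Dict.contains_iff_mem_keys _ _).mpr (by rw [hk1]; exact hx)
        rw [PySem.Dict.keys_insert_of_contains _ _ hc]
        exact hk1
      · intro z y hzy
        rw [PySem.Dict.get?_insert] at hzy
        by_cases hzx : z = x
        · rw [if_pos hzx] at hzy
          cases hzy
          refine ⟨hrS, fun hne2 => ?_⟩
          rcases good_h_le G hrx with heq | hlt2
          · exact absurd heq.symm (hzx ▸ hne2)
          · rw [hzx]; exact hlt2
        · rw [if_neg hzx] at hzy
          exact he1 z y hzy
      · intro z w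
        exact (rooted_insert_root_iff hrxq z w).trans (hpres z w)
    · have hpxx' : px = x := not_not.mp hpxx
      have hred : findA (fuel+1) p x = (x, p) := by simp [findA, hpx, hpxx']
      rw [hred]
      exact ⟨RootedAt.self x (hpxx' ▸ hpx), G, fun z w => Iff.rfl⟩

theorem rooted_total {S : List String} {h : String → Nat} {p : PySem.Dict String String}
    (G : GoodA S h p) {x : String} (hx : x ∈ S) : ∃ r, RootedAt p x r :=
  ⟨_, (find_ok (msr h S x) p x G hx le_rfl).1⟩

-- linking px to py (two distinct roots): new roots in closed form
theorem rooted_link_iff {p : PySem.Dict String String} {px py : String}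
    (hpx : p.get? px = some px) (hpy : p.get? py = some py) (hne : px ≠ py) (z w : String) :
    RootedAt (p.insert px py) z w ↔
      ((RootedAt p z px ∧ w = py) ∨ (RootedAt p z w ∧ w ≠ px)) := by
  have hq : ∀ u, (p.insert px py).get? u = if u = px then some py else p.get? u := fun u =>
    PySem.Dict.get?_insert p px u py
  constructor
  · intro hzw
    induction hzw with
    | self z hz =>
      rw [hq z] at hz
      by_cases hzpx : z = px
      · rw [if_pos hzpx] at hz
        have hzy : py = z := by injection hz
        exact absurd (hzpx ▸ hzy) hne.symm
      · rw [if_neg hzpx] at hz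
        exact Or.inr ⟨RootedAt.self z hz, hzpx⟩
    | step z y w hz hne2 hyw ih =>
      rw [hq z] at hz
      by_cases hzpx : z = px
      · rw [if_pos hzpx] at hz
        have hy : py = y := by injection hz
        rcases ih with ⟨hypx, hwpy⟩ | ⟨hyw, hwpx⟩
        · have hypx' : RootedAt p py px := by rw [← hy] at hypx; exact hypx
          exact absurd (rooted_unique hypx' (RootedAt.self py hpy)) hne
        · have hyw' : RootedAt p py w := by rw [← hy] at hyw; exact hyw
          have hw : w = py := rooted_unique hyw' (RootedAt.self py hpy)
          refine Or.inl ⟨?_, hw⟩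
          rw [hzpx]
          exact RootedAt.self px hpx
      · rw [if_neg hzpx] at hz
        rcases ih with ⟨hypx, hwpy⟩ | ⟨hyw, hwpx⟩
        · exact Or.inl ⟨RootedAt.step z y px hz hne2 hypx, hwpy⟩
        · exact Or.inr ⟨RootedAt.step z y w hz hne2 hyw, hwpx⟩
  · have aux1 : ∀ u r, RootedAt p u r → r = px → RootedAt (p.insert px py) u py := by
      intro u r hur
      induction hur with
      | self u hu =>
        intro hupx
        refine RootedAt.step u py py ?_ (by rw [hupx]; exact hne.symm) (RootedAt.self py ?_)
        · rw [hq u, if_pos hupx]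
        · rw [hq py, if_neg (Ne.symm hne)]; exact hpy
      | step u y r hu hne2 hyr ih =>
        intro hrpx
        have hupx : u ≠ px := by
          intro hupx
          rw [hupx, hpx] at hu
          cases hu
          exact hne2 hupx.symm
        exact RootedAt.step u y py (by rw [hq u, if_neg hupx]; exact hu) hne2 (ih hrpx)
    have aux2 : ∀ u r, RootedAt p u r → r ≠ px → RootedAt (p.insert px py) u r := by
      intro u r hur
      induction hur with
      | self u hu =>
        intro hupx
        exact RootedAt.self u (by rw [hq u, if_neg hupx]; exact hu)
      | step u y r hu hne2 hyr ih =>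
        intro hrpx
        have hupx : u ≠ px := by
          intro hupx
          rw [hupx, hpx] at hu
          cases hu
          exact hne2 hupx.symm
        exact RootedAt.step u y r (by rw [hq u, if_neg hupx]; exact hu) hne2 (ih hrpx)
    rintro (⟨hzpx, rfl⟩ | ⟨hzw, hwpx⟩)
    · exact aux1 z px hzpx rfl
    · exact aux2 z w hzw hwpx

theorem sameRoot_iff_eq_roots {p : PySem.Dict String String} {a b ra rb : String}
    (hra : RootedAt p a ra) (hrb : RootedAt p b rb) : SameRoot p a b ↔ ra = rb := by
  constructor
  · rintro ⟨r, h1, h2⟩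
    exact (rooted_unique h1 hra).symm.trans (rooted_unique h2 hrb)
  · intro hEq
    exact ⟨rb, hEq ▸ hra, hrb⟩

theorem union_ok {S : List String} {h : String → Nat} {p : PySem.Dict String String}
    (G : GoodA S h p) {x y : String} (hx : x ∈ S) (hy : y ∈ S) :
    ∃ h', GoodA S h' (unionA p x y) ∧
      ∀ a b, a ∈ S → b ∈ S →
        (SameRoot (unionA p x y) a b ↔ joinRel (SameRoot p) x y a b) := by
  obtain ⟨hr1, G1, pres1⟩ :=
    find_ok p.size p x G hx (by rw [good_size G]; exact msr_le x)
  obtain ⟨hr2, G2, pres2⟩ :=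
    find_ok (findA p.size p x).2.size (findA p.size p x).2 y G1 hy
      (by rw [good_size G1]; exact msr_le y)
  set px' := (findA p.size p x).1 with hpxd
  set p1 := (findA p.size p x).2 with hp1d
  set py' := (findA p1.size p1 y).1 with hpyd
  set p2 := (findA p1.size p1 y).2 with hp2d
  -- facts in p
  have hr2p : RootedAt p y py' := (pres1 _ _).mp hr2
  have hpxS : px' ∈ S := rooted_mem G hr1 hx
  have hpyS : py' ∈ S := rooted_mem G hr2p hy
  have pres12 : ∀ z w, RootedAt p2 z w ↔ RootedAt p z w := fun z w =>
    (pres2 z w).trans (pres1 z w)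
  have hrootpx : p2.get? px' = some px' :=
    rooted_root ((pres12 _ _).mpr (rooted_refl_root hr1))
  have hrootpy : p2.get? py' = some py' := rooted_root ((pres2 _ _).mpr (rooted_refl_root hr2))
  by_cases hne : px' ≠ py'
  · have hu : unionA p x y = p2.insert px' py' := by
      simp only [unionA, ← hpxd, ← hp1d, ← hpyd, ← hp2d, if_pos hne]
    rw [hu]
    refine ⟨fun z => if z = py' then h px' + h py' + 1 else h z, ⟨?_, ?_⟩, ?_⟩
    · have hc : p2.contains px' = true :=
        (PySem.Dict.contains_iff_mem_keys _ _).mpr (by rw [G2.1]; exact hpxS)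
      rw [PySem.Dict.keys_insert_of_contains _ _ hc]
      exact G2.1
    · intro z u hzu
      rw [PySem.Dict.get?_insert] at hzu
      by_cases hzpx : z = px'
      · rw [if_pos hzpx] at hzu
        have hu' : py' = u := by injection hzu
        subst hu'
        refine ⟨hpyS, fun _ => ?_⟩
        rw [hzpx]
        show (if px' = py' then h px' + h py' + 1 else h px') <
            (if py' = py' then h px' + h py' + 1 else h py')
        rw [if_neg hne, if_pos rfl]
        omega
      · rw [if_neg hzpx] at hzu
        have ⟨huS, hurel⟩ := G2.2 z u hzu
        refine ⟨huS, fun hne2 => ?_⟩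
        have hzpy : z ≠ py' := by
          intro hzpy
          rw [hzpy, hrootpy] at hzu
          have : py' = u := by injection hzu
          exact hne2 (hzpy ▸ this.symm)
        show (if z = py' then h px' + h py' + 1 else h z) <
            (if u = py' then h px' + h py' + 1 else h u)
        rw [if_neg hzpy]
        by_cases hupy : u = py'
        · rw [if_pos hupy]
          have := hurel hne2
          rw [hupy] at this
          omega
        · rw [if_neg hupy]
          exact hurel hne2
    · intro a b ha hb
      have hnepx : px' ≠ py' := hne
      obtain ⟨ra, hra⟩ := rooted_total G ha
      obtain ⟨rb, hrb⟩ := rooted_total G hb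
      have hra2 : RootedAt p2 a ra := (pres12 _ _).mpr hra
      have hrb2 : RootedAt p2 b rb := (pres12 _ _).mpr hrb
      have hraq : RootedAt (p2.insert px' py') a (if ra = px' then py' else ra) := by
        by_cases hx2 : ra = px'
        · rw [if_pos hx2]
          exact (rooted_link_iff hrootpx hrootpy hnepx a py').mpr
            (Or.inl ⟨hx2 ▸ hra2, rfl⟩)
        · rw [if_neg hx2]
          exact (rooted_link_iff hrootpx hrootpy hnepx a ra).mpr (Or.inr ⟨hra2, hx2⟩)
      have hrbq : RootedAt (p2.insert px' py') b (if rb = px' then py' else rb) := by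
        by_cases hx2 : rb = px'
        · rw [if_pos hx2]
          exact (rooted_link_iff hrootpx hrootpy hnepx b py').mpr
            (Or.inl ⟨hx2 ▸ hrb2, rfl⟩)
        · rw [if_neg hx2]
          exact (rooted_link_iff hrootpx hrootpy hnepx b rb).mpr (Or.inr ⟨hrb2, hx2⟩)
      rw [sameRoot_iff_eq_roots hraq hrbq]
      have h1 : joinRel (SameRoot p) x y a b ↔
          (ra = rb ∨ (ra = px' ∧ py' = rb) ∨ (ra = py' ∧ px' = rb)) := by
        unfold joinRel
        rw [sameRoot_iff_eq_roots hra hrb, sameRoot_iff_eq_roots hra hr1,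
          sameRoot_iff_eq_roots hr2p hrb, sameRoot_iff_eq_roots hra hr2p,
          sameRoot_iff_eq_roots hr1 hrb]
      rw [h1]
      constructor
      · intro h5
        by_cases hA : ra = px'
        · by_cases hB : rb = px'
          · exact Or.inl (hA.trans hB.symm)
          · rw [if_pos hA, if_neg hB] at h5
            exact Or.inr (Or.inl ⟨hA, h5⟩)
        · by_cases hB : rb = px'
          · rw [if_neg hA, if_pos hB] at h5
            exact Or.inr (Or.inr ⟨h5, hB.symm⟩)
          · rw [if_neg hA, if_neg hB] at h5
            exact Or.inl h5
      · intro h5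
        by_cases hA : ra = px'
        · by_cases hB : rb = px'
          · rw [if_pos hA, if_pos hB]
          · rw [if_pos hA, if_neg hB]
            rcases h5 with h5 | ⟨_, h6⟩ | ⟨h5', _⟩
            · exact absurd (h5 ▸ hA) hB
            · exact h6
            · exact absurd (hA.symm.trans h5') hne
        · by_cases hB : rb = px'
          · rw [if_neg hA, if_pos hB]
            rcases h5 with h5 | ⟨h5', _⟩ | ⟨h5', _⟩
            · exact absurd (h5.trans hB) hA
            · exact absurd h5' hA
            · exact h5'
          · rw [if_neg hA, if_neg hB]
            rcases h5 with h5 | ⟨h5', h6⟩ | ⟨h5', h6'⟩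
            · exact h5
            · exact absurd h5' hA
            · exact absurd h6'.symm hB
  · rw [not_not] at hne
    have hu : unionA p x y = p2 := by
      simp only [unionA, ← hpxd, ← hp1d, ← hpyd, ← hp2d, hne]
      simp
    rw [hu]
    refine ⟨h, G2, ?_⟩
    intro a b ha hb
    obtain ⟨ra, hra⟩ := rooted_total G ha
    obtain ⟨rb, hrb⟩ := rooted_total G hb
    have hra2 : RootedAt p2 a ra := (pres12 _ _).mpr hra
    have hrb2 : RootedAt p2 b rb := (pres12 _ _).mpr hrb
    rw [sameRoot_iff_eq_roots hra2 hrb2]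
    unfold joinRel
    rw [sameRoot_iff_eq_roots hra hrb, sameRoot_iff_eq_roots hra hr1,
      sameRoot_iff_eq_roots hr2p hrb, sameRoot_iff_eq_roots hra hr2p,
      sameRoot_iff_eq_roots hr1 hrb]
    constructor
    · intro h5; exact Or.inl h5
    · intro h5
      rcases h5 with h5 | ⟨h5, h6⟩ | ⟨h5, h6⟩
      · exact h5
      · exact (h5.trans hne).trans h6
      · exact (h5.trans hne.symm).trans h6

-- ===== B-side lemmas =====

theorem relabel_get? (lab : PySem.Dict String String) (l1 l2 z : String) :
    (relabelB lab l1 l2).get? z = (lab.get? z).map (fun v => if v = l1 then l2 else v) := by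
  obtain ⟨l⟩ := lab
  induction l with
  | nil => rfl
  | cons kv rest ih =>
    obtain ⟨k, v⟩ := kv
    show (PySem.Dict.mk ((k, if v = l1 then l2 else v) ::
        rest.map (fun kv => (kv.1, if kv.2 = l1 then l2 else kv.2)))).get? z =
      ((PySem.Dict.mk ((k, v) :: rest)).get? z).map (fun v => if v = l1 then l2 else v)
    rw [PySem.Dict.get?_mk_cons, PySem.Dict.get?_mk_cons]
    by_cases hk : (k == z) = true
    · rw [if_pos hk, if_pos hk]
      rfl
    · rw [if_neg hk, if_neg hk]
      exact ih

theorem relabel_keys (lab : PySem.Dict String String) (l1 l2 : String) :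
    (relabelB lab l1 l2).keys = lab.keys := by
  simp [relabelB, PySem.Dict.keys, List.map_map, Function.comp]

theorem stepB_keys (lab : PySem.Dict String String) (pr : String × String × Int) :
    (stepB lab pr).keys = lab.keys := by
  show (if lab.getD pr.1 pr.1 ≠ lab.getD pr.2.1 pr.2.1
      then relabelB lab (lab.getD pr.1 pr.1) (lab.getD pr.2.1 pr.2.1) else lab).keys = lab.keys
  split
  · exact relabel_keys lab _ _
  · rfl

-- relabelling the class of l1 to l2 merges exactly those two classes
theorem merge_if_iff {l1 l2 La Lb : String} (hne : l1 ≠ l2) :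
    ((if La = l1 then l2 else La) = (if Lb = l1 then l2 else Lb)) ↔
      (La = Lb ∨ (La = l1 ∧ l2 = Lb) ∨ (La = l2 ∧ l1 = Lb)) := by
  constructor
  · intro h5
    by_cases hA : La = l1
    · by_cases hB : Lb = l1
      · exact Or.inl (hA.trans hB.symm)
      · rw [if_pos hA, if_neg hB] at h5
        exact Or.inr (Or.inl ⟨hA, h5⟩)
    · by_cases hB : Lb = l1
      · rw [if_neg hA, if_pos hB] at h5
        exact Or.inr (Or.inr ⟨h5, hB.symm⟩)
      · rw [if_neg hA, if_neg hB] at h5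
        exact Or.inl h5
  · intro h5
    by_cases hA : La = l1
    · by_cases hB : Lb = l1
      · rw [if_pos hA, if_pos hB]
      · rw [if_pos hA, if_neg hB]
        rcases h5 with h5 | ⟨_, h6⟩ | ⟨h5', _⟩
        · exact absurd (h5 ▸ hA) hB
        · exact h6
        · exact absurd (hA.symm.trans h5') hne
    · by_cases hB : Lb = l1
      · rw [if_neg hA, if_pos hB]
        rcases h5 with h5 | ⟨h5', _⟩ | ⟨h5', _⟩
        · exact absurd (h5.trans hB) hA
        · exact absurd h5' hA
        · exact h5'
      · rw [if_neg hA, if_neg hB]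
        rcases h5 with h5 | ⟨h5', h6⟩ | ⟨h5', h6'⟩
        · exact h5
        · exact absurd h5' hA
        · exact absurd h6'.symm hB

theorem stepB_lab {S : List String} {lab : PySem.Dict String String} (hk : lab.keys = S)
    {id1 id2 : String} (d : Int) {a b : String}
    (ha : a ∈ S) (hb : b ∈ S) :
    (LabF (stepB lab (id1, id2, d)) a = LabF (stepB lab (id1, id2, d)) b ↔
      joinRel (fun u v => LabF lab u = LabF lab v) id1 id2 a b) := by
  have hLab : ∀ z, z ∈ S →
      LabF (relabelB lab (lab.getD id1 id1) (lab.getD id2 id2)) z =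
        (if LabF lab z = lab.getD id1 id1 then lab.getD id2 id2 else LabF lab z) := by
    intro z hz
    have hzk : z ∈ lab.keys := hk ▸ hz
    cases hv : lab.get? z with
    | none => exact absurd hzk ((PySem.Dict.get?_eq_none_iff_not_mem_keys lab z).mp hv)
    | some v =>
      have hget := relabel_get? lab (lab.getD id1 id1) (lab.getD id2 id2) z
      rw [hv] at hget
      unfold LabF
      rw [PySem.Dict.getD_of_get?_eq_some _ z hget,
        PySem.Dict.getD_of_get?_eq_some _ z hv]
  by_cases hll : lab.getD id1 id1 = lab.getD id2 id2
  · have hstep : stepB lab (id1, id2, d) = lab := by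
      show (if lab.getD id1 id1 ≠ lab.getD id2 id2
          then relabelB lab (lab.getD id1 id1) (lab.getD id2 id2) else lab) = lab
      rw [if_neg (by simp [hll])]
    rw [hstep]
    unfold joinRel LabF
    constructor
    · exact fun h5 => Or.inl h5
    · intro h5
      rcases h5 with h5 | ⟨h5, h6⟩ | ⟨h5, h6⟩
      · exact h5
      · exact (h5.trans hll).trans h6
      · exact (h5.trans hll.symm).trans h6
  · have hstep : stepB lab (id1, id2, d) = relabelB lab (lab.getD id1 id1) (lab.getD id2 id2) := by
      show (if lab.getD id1 id1 ≠ lab.getD id2 id2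
          then relabelB lab (lab.getD id1 id1) (lab.getD id2 id2) else lab) =
        relabelB lab (lab.getD id1 id1) (lab.getD id2 id2)
      rw [if_pos hll]
    rw [hstep, hLab a ha, hLab b hb]
    unfold joinRel LabF
    exact merge_if_iff hll

-- ===== init and grouping =====

theorem init_get? (l : List String) (d : PySem.Dict String String) (x : String) :
    (l.foldl (fun d a => d.insert a a) d).get? x =
      if x ∈ l then some x else d.get? x := by
  induction l generalizing d with
  | nil => simp
  | cons a l ih =>
    show (l.foldl (fun d a => d.insert a a) (d.insert a a)).get? x = _
    rw [ih]
    by_cases hxl : x ∈ l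
    · rw [if_pos hxl, if_pos (List.mem_cons_of_mem a hxl)]
    · rw [if_neg hxl, PySem.Dict.get?_insert]
      by_cases hxa : x = a
      · rw [if_pos hxa, if_pos (by rw [hxa]; exact List.mem_cons_self), hxa]
      · rw [if_neg hxa, if_neg (by simp [List.mem_cons, hxa, hxl])]

-- normal form of both grouping loops
def groupStep (f : String → String) (d : PySem.Dict String (PySem.Set String)) (a : String) :
    PySem.Dict String (PySem.Set String) :=
  d.insert (f a) (PySem.Set.add (d.getD (f a) PySem.Set.empty) a)

-- positional relation between the two group dicts: same members, corresponding keys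
def pairRel (f g : String → String) (xs : List String) (p q : String × PySem.Set String) : Prop :=
  p.2 = q.2 ∧ ∀ b ∈ xs, (f b = p.1 ↔ g b = q.1)

theorem forall₂_append_singleton {α β : Type} {R : α → β → Prop} {l1 : List α} {l2 : List β}
    {x : α} {y : β} (h : List.Forall₂ R l1 l2) (hxy : R x y) :
    List.Forall₂ R (l1 ++ [x]) (l2 ++ [y]) := by
  induction h with
  | nil => exact List.Forall₂.cons hxy List.Forall₂.nil
  | cons h1 _ ih => exact List.Forall₂.cons h1 ih

theorem values_eq_of_forall₂ {d d' : PySem.Dict String (PySem.Set String)}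
    (h : List.Forall₂ (fun p q : String × PySem.Set String => p.2 = q.2) d.items d'.items) :
    d.values = d'.values := by
  obtain ⟨l⟩ := d
  obtain ⟨l'⟩ := d'
  have h' : List.Forall₂ (fun p q : String × PySem.Set String => p.2 = q.2) l l' := h
  show l.map (fun p => p.2) = l'.map (fun p => p.2)
  clear h
  induction h' with
  | nil => rfl
  | cons h1 _ ih => simp only [List.map_cons, h1, ih]

theorem groupBy_aux (f g : String → String) :
    ∀ (xs : List String) (df dg : PySem.Dict String (PySem.Set String)),
      (∀ a b, a ∈ xs → b ∈ xs → (f a = f b ↔ g a = g b)) →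
      (∀ a ∈ xs, df.contains (f a) = dg.contains (g a)) →
      (∀ a ∈ xs, df.getD (f a) PySem.Set.empty = dg.getD (g a) PySem.Set.empty) →
      List.Forall₂ (pairRel f g xs) df.items dg.items →
      List.Forall₂ (fun p q : String × PySem.Set String => p.2 = q.2)
        (xs.foldl (groupStep f) df).items (xs.foldl (groupStep g) dg).items := by
  intro xs
  induction xs with
  | nil =>
    intro df dg _ _ _ hF
    exact hF.imp (fun _ _ hpq => hpq.1)
  | cons a xs ih =>
    intro df dg hfg hcont hgetD hF
    have hvv : PySem.Set.add (df.getD (f a) PySem.Set.empty) a =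
        PySem.Set.add (dg.getD (g a) PySem.Set.empty) a := by
      rw [hgetD a List.mem_cons_self]
    have hbeq : ∀ b ∈ xs, (f b == f a) = (g b == g a) := by
      intro b hb
      by_cases hfb : f b = f a
      · have hgb := (hfg b a (List.mem_cons_of_mem a hb) List.mem_cons_self).mp hfb
        simp [hfb, hgb]
      · have hgb : ¬ g b = g a := fun hgb =>
          hfb ((hfg b a (List.mem_cons_of_mem a hb) List.mem_cons_self).mpr hgb)
        simp [hfb, hgb]
    simp only [List.foldl_cons]
    apply ih
    · exact fun u v hu hv =>
        hfg u v (List.mem_cons_of_mem a hu) (List.mem_cons_of_mem a hv)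
    · intro b hb
      unfold groupStep
      rw [PySem.Dict.contains_insert, PySem.Dict.contains_insert, hbeq b hb,
        hcont b (List.mem_cons_of_mem a hb)]
    · intro b hb
      unfold groupStep
      rw [PySem.Dict.getD_insert, PySem.Dict.getD_insert]
      by_cases hfb : f b = f a
      · have hgb := (hfg b a (List.mem_cons_of_mem a hb) List.mem_cons_self).mp hfb
        rw [if_pos hfb, if_pos hgb]
        exact hvv
      · have hgb : ¬ g b = g a := fun hgb =>
          hfb ((hfg b a (List.mem_cons_of_mem a hb) List.mem_cons_self).mpr hgb)
        rw [if_neg hfb, if_neg hgb]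
        exact hgetD b (List.mem_cons_of_mem a hb)
    · by_cases hca : df.contains (f a) = true
      · have hcb : dg.contains (g a) = true := by rw [← hcont a List.mem_cons_self]; exact hca
        unfold groupStep
        rw [PySem.Dict.items_insert_of_contains _ _ hca,
          PySem.Dict.items_insert_of_contains _ _ hcb]
        rw [List.forall₂_map_left_iff, List.forall₂_map_right_iff]
        refine hF.imp ?_
        rintro p q ⟨hsnd, hkey⟩
        have hpq : (p.1 == f a) = (q.1 == g a) := by
          by_cases hp : p.1 = f a
          · have hq : g a = q.1 := (hkey a List.mem_cons_self).mp hp.symm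
            simp [hp, hq.symm]
          · have hq : ¬ q.1 = g a := fun hq =>
              hp ((hkey a List.mem_cons_self).mpr hq.symm).symm
            simp [hp, hq]
        by_cases hp : (p.1 == f a) = true
        · rw [if_pos hp, if_pos (hpq ▸ hp)]
          exact ⟨hvv, fun b hb => hfg b a (List.mem_cons_of_mem a hb) List.mem_cons_self⟩
        · rw [if_neg hp, if_neg (hpq ▸ hp)]
          exact ⟨hsnd, fun b hb => hkey b (List.mem_cons_of_mem a hb)⟩
      · have hca' : df.contains (f a) = false := by
          cases hc : df.contains (f a)
          · rfl
          · exact absurd hc hca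
        have hcb' : dg.contains (g a) = false := by
          rw [← hcont a List.mem_cons_self]; exact hca'
        unfold groupStep
        rw [PySem.Dict.items_insert_of_not_contains _ _ hca',
          PySem.Dict.items_insert_of_not_contains _ _ hcb']
        refine forall₂_append_singleton
          (hF.imp ?_) ⟨hvv, fun b hb => hfg b a (List.mem_cons_of_mem a hb) List.mem_cons_self⟩
        rintro p q ⟨hsnd, hkey⟩
        exact ⟨hsnd, fun b hb => hkey b (List.mem_cons_of_mem a hb)⟩

theorem groupBy_congr (f g : String → String) (xs : List String)
    (hfg : ∀ a b, a ∈ xs → b ∈ xs → (f a = f b ↔ g a = g b)) :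
    (xs.foldl (groupStep f) PySem.Dict.empty).values =
      (xs.foldl (groupStep g) PySem.Dict.empty).values :=
  values_eq_of_forall₂
    (groupBy_aux f g xs PySem.Dict.empty PySem.Dict.empty hfg
      (fun _ _ => rfl) (fun _ _ => rfl) List.Forall₂.nil)

-- processing the pairs keeps the two partitions (by root / by label) identical
theorem pairs_chain {S : List String} :
    ∀ (prs : List (String × String × Int)) (p lab : PySem.Dict String String),
      (∃ h, GoodA S h p) → lab.keys = S →
      (∀ a b, a ∈ S → b ∈ S → (SameRoot p a b ↔ LabF lab a = LabF lab b)) →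
      (∀ pr ∈ prs, pr.1 ∈ S ∧ pr.2.1 ∈ S) →
      (∃ h, GoodA S h (prs.foldl (fun p pr => unionA p pr.1 pr.2.1) p)) ∧
      (prs.foldl stepB lab).keys = S ∧
      (∀ a b, a ∈ S → b ∈ S →
        (SameRoot (prs.foldl (fun p pr => unionA p pr.1 pr.2.1) p) a b ↔
          LabF (prs.foldl stepB lab) a = LabF (prs.foldl stepB lab) b)) := by
  intro prs
  induction prs with
  | nil =>
    intro p lab hG hk hinv _
    exact ⟨hG, hk, hinv⟩
  | cons pr prs ih =>
    intro p lab hG hk hinv hpre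
    obtain ⟨h, G⟩ := hG
    have h1 : pr.1 ∈ S := (hpre pr List.mem_cons_self).1
    have h2 : pr.2.1 ∈ S := (hpre pr List.mem_cons_self).2
    obtain ⟨h', G', hjoin⟩ := union_ok G h1 h2
    have hkeys' : (stepB lab pr).keys = S := (stepB_keys lab pr).trans hk
    have hinv' : ∀ a b, a ∈ S → b ∈ S →
        (SameRoot (unionA p pr.1 pr.2.1) a b ↔
          LabF (stepB lab pr) a = LabF (stepB lab pr) b) := by
      intro a b ha hb
      rw [hjoin a b ha hb, stepB_lab hk pr.2.2 ha hb]
      unfold joinRel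
      rw [hinv a b ha hb, hinv a pr.1 ha h1, hinv pr.2.1 b h2 hb,
        hinv a pr.2.1 ha h2, hinv pr.1 b h1 hb]
    simp only [List.foldl_cons]
    exact ih _ _ ⟨h', G'⟩ hkeys' hinv' (fun q hq => hpre q (List.mem_cons_of_mem pr hq))

-- A's grouping loop is grouping by the (stable) root in parent1
theorem groupA_loop {S : List String} {h : String → Nat} {parent1 : PySem.Dict String String}
    (Gp : GoodA S h parent1) :
    ∀ (l : List String) (p : PySem.Dict String String) (g : PySem.Dict String (PySem.Set String)),
      GoodA S h p → (∀ z w, RootedAt p z w ↔ RootedAt parent1 z w) →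
      (∀ a ∈ l, a ∈ S) →
      (l.foldl (fun (st : PySem.Dict String String × PySem.Dict String (PySem.Set String)) aid =>
          let fr := findA st.1.size st.1 aid
          let g1 := if st.2.contains fr.1 then st.2 else st.2.insert fr.1 PySem.Set.empty
          (fr.2, g1.insert fr.1 (PySem.Set.add (g1.getD fr.1 PySem.Set.empty) aid)))
        (p, g)).2
      = l.foldl (groupStep (fun a => (findA parent1.size parent1 a).1)) g := by
  intro l
  induction l with
  | nil => intro p g _ _ _; rfl
  | cons a l ih =>
    intro p g Gq pres hmem
    have haS : a ∈ S := hmem a List.mem_cons_self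
    obtain ⟨hra, Gq', pres'⟩ :=
      find_ok p.size p a Gq haS (by rw [good_size Gq]; exact msr_le a)
    obtain ⟨hfa, -, -⟩ :=
      find_ok parent1.size parent1 a Gp haS (by rw [good_size Gp]; exact msr_le a)
    have hr_eq : (findA p.size p a).1 = (findA parent1.size parent1 a).1 :=
      rooted_unique ((pres _ _).mp hra) hfa
    simp only [List.foldl_cons]
    have hrec := ih (findA p.size p a).2
      ((if g.contains (findA p.size p a).1 then g
          else g.insert (findA p.size p a).1 PySem.Set.empty).insert (findA p.size p a).1
        (PySem.Set.add ((if g.contains (findA p.size p a).1 then g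
            else g.insert (findA p.size p a).1 PySem.Set.empty).getD (findA p.size p a).1
          PySem.Set.empty) a))
      Gq' (fun z w => (pres' z w).trans (pres z w))
      (fun b hb => hmem b (List.mem_cons_of_mem a hb))
    refine hrec.trans ?_
    have hstep : (if g.contains (findA p.size p a).1 then g
          else g.insert (findA p.size p a).1 PySem.Set.empty).insert (findA p.size p a).1
        (PySem.Set.add ((if g.contains (findA p.size p a).1 then g
            else g.insert (findA p.size p a).1 PySem.Set.empty).getD (findA p.size p a).1
          PySem.Set.empty) a)
        = groupStep (fun a => (findA parent1.size parent1 a).1) g a := by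
      rw [hr_eq]
      unfold groupStep
      by_cases hc : g.contains (findA parent1.size parent1 a).1 = true
      · rw [if_pos hc]
      · have hc' : g.contains (findA parent1.size parent1 a).1 = false := by
          cases h2 : g.contains (findA parent1.size parent1 a).1
          · rfl
          · exact absurd h2 hc
        rw [if_neg hc, PySem.Dict.getD_insert_self, PySem.Dict.insert_insert_self,
          PySem.Dict.getD_of_not_contains _ _ hc']
    rw [hstep]

-- B's grouping loop is grouping by the final label
theorem groupB_loop (label1 : PySem.Dict String String) (l : List String)
    (g : PySem.Dict String (PySem.Set String)) :
    l.foldl (fun (g : PySem.Dict String (PySem.Set String)) aid =>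
        let r := label1.getD aid aid
        let g1 := g.setdefault r PySem.Set.empty
        g1.insert r (PySem.Set.add (g1.getD r PySem.Set.empty) aid)) g
      = l.foldl (groupStep (LabF label1)) g := by
  apply PySem.List.foldl_congr_mem
  intro acc x _
  show (acc.setdefault (label1.getD x x) PySem.Set.empty).insert (label1.getD x x)
      (PySem.Set.add ((acc.setdefault (label1.getD x x) PySem.Set.empty).getD
        (label1.getD x x) PySem.Set.empty) x)
    = groupStep (LabF label1) acc x
  by_cases hc : acc.contains (label1.getD x x) = true
  · rw [PySem.Dict.setdefault_of_contains _ _ hc]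
    rfl
  · have hc' : acc.contains (label1.getD x x) = false := by
      cases h2 : acc.contains (label1.getD x x)
      · rfl
      · exact absurd h2 hc
    rw [PySem.Dict.setdefault_of_not_contains _ _ hc', PySem.Dict.getD_insert_self,
      PySem.Dict.insert_insert_self]
    unfold groupStep LabF
    rw [PySem.Dict.getD_of_not_contains _ _ hc']

-- ===== VERDICT (by name: the statement is the Claim_ definition above) =====
theorem union_find_py_spec : Claim_equal_union_find_py := by
  intro asset_ids pairs _ hpre
  unfold Spec_union_find_py union_find_py union_find_py_alt
  show (asset_ids.foldl
      (fun (st : PySem.Dict String String × PySem.Dict String (PySem.Set String)) aid =>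
        let fr := findA st.1.size st.1 aid
        let g1 := if st.2.contains fr.1 then st.2 else st.2.insert fr.1 PySem.Set.empty
        (fr.2, g1.insert fr.1 (PySem.Set.add (g1.getD fr.1 PySem.Set.empty) aid)))
      (pairs.foldl (fun p pr => unionA p pr.1 pr.2.1)
        (asset_ids.foldl (fun d a => d.insert a a) PySem.Dict.empty), PySem.Dict.empty)).2.values
    = (asset_ids.foldl
      (fun (g : PySem.Dict String (PySem.Set String)) aid =>
        let r := (pairs.foldl stepB
            (asset_ids.foldl (fun d a => d.insert a a) PySem.Dict.empty)).getD aid aid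
        let g1 := g.setdefault r PySem.Set.empty
        g1.insert r (PySem.Set.add (g1.getD r PySem.Set.empty) aid))
      PySem.Dict.empty).values
  have hget0 : ∀ z, (asset_ids.foldl (fun d a => d.insert a a) PySem.Dict.empty).get? z =
      if z ∈ asset_ids then some z else none := by
    intro z
    rw [init_get?, PySem.Dict.get?_empty]
  have hkeys0 : (asset_ids.foldl (fun d a => d.insert a a) PySem.Dict.empty).keys =
      PySem.Set.ofList asset_ids := by
    rw [PySem.Dict.keys_foldl_insert asset_ids (fun _ x => x) PySem.Dict.empty]
    rfl
  have G0 : GoodA (PySem.Set.ofList asset_ids) (fun _ => 0)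
      (asset_ids.foldl (fun d a => d.insert a a) PySem.Dict.empty) := by
    refine ⟨hkeys0, ?_⟩
    intro x y hxy
    rw [hget0 x] at hxy
    by_cases hx : x ∈ asset_ids
    · rw [if_pos hx] at hxy
      have hxy' : x = y := by injection hxy
      exact ⟨hxy' ▸ (PySem.Set.mem_ofList asset_ids x).mpr hx,
        fun hne => absurd hxy'.symm hne⟩
    · rw [if_neg hx] at hxy
      cases hxy
  have hself : ∀ z, z ∈ PySem.Set.ofList asset_ids →
      RootedAt (asset_ids.foldl (fun d a => d.insert a a) PySem.Dict.empty) z z := by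
    intro z hz
    exact RootedAt.self z
      (by rw [hget0 z, if_pos ((PySem.Set.mem_ofList asset_ids z).mp hz)])
  have hlab0 : ∀ z, z ∈ PySem.Set.ofList asset_ids →
      LabF (asset_ids.foldl (fun d a => d.insert a a) PySem.Dict.empty) z = z := by
    intro z hz
    exact PySem.Dict.getD_of_get?_eq_some _ z
      (by rw [hget0 z, if_pos ((PySem.Set.mem_ofList asset_ids z).mp hz)])
  have inv0 : ∀ a b, a ∈ PySem.Set.ofList asset_ids → b ∈ PySem.Set.ofList asset_ids →
      (SameRoot (asset_ids.foldl (fun d a => d.insert a a) PySem.Dict.empty) a b ↔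
        LabF (asset_ids.foldl (fun d a => d.insert a a) PySem.Dict.empty) a =
          LabF (asset_ids.foldl (fun d a => d.insert a a) PySem.Dict.empty) b) := by
    intro a b ha hb
    rw [sameRoot_iff_eq_roots (hself a ha) (hself b hb), hlab0 a ha, hlab0 b hb]
  have hpreS : ∀ pr ∈ pairs, pr.1 ∈ PySem.Set.ofList asset_ids ∧
      pr.2.1 ∈ PySem.Set.ofList asset_ids := fun pr hpr =>
    ⟨(PySem.Set.mem_ofList asset_ids pr.1).mpr (hpre pr hpr).1,
      (PySem.Set.mem_ofList asset_ids pr.2.1).mpr (hpre pr hpr).2⟩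
  obtain ⟨⟨h1, G1⟩, hk1, inv1⟩ :=
    pairs_chain pairs _ _ ⟨_, G0⟩ hkeys0 inv0 hpreS
  rw [groupA_loop G1 asset_ids _ PySem.Dict.empty G1 (fun z w => Iff.rfl)
    (fun a ha => (PySem.Set.mem_ofList asset_ids a).mpr ha)]
  rw [groupB_loop]
  apply groupBy_congr
  intro a b ha hb
  have haS := (PySem.Set.mem_ofList asset_ids a).mpr ha
  have hbS := (PySem.Set.mem_ofList asset_ids b).mpr hb
  obtain ⟨hfa, -, -⟩ := find_ok (pairs.foldl (fun p pr => unionA p pr.1 pr.2.1)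
      (asset_ids.foldl (fun d a => d.insert a a) PySem.Dict.empty)).size _ a G1 haS
    (by rw [good_size G1]; exact msr_le a)
  obtain ⟨hfb, -, -⟩ := find_ok (pairs.foldl (fun p pr => unionA p pr.1 pr.2.1)
      (asset_ids.foldl (fun d a => d.insert a a) PySem.Dict.empty)).size _ b G1 hbS
    (by rw [good_size G1]; exact msr_le b)
  have hiff := inv1 a b haS hbS
  rw [sameRoot_iff_eq_roots hfa hfb] at hiff
  exact hiff
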